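-- pv_equiv track=rewrite | github.com/Fauthog/Conveyor | modbus_ld 1/homing.py | decimal_to_hex_groups
-- ===== SOURCE A (Python) =====
-- def decimal_to_hex_groups(number):
--     if not (-2**31 <= number < 2**31):
--         raise ValueError("Number out of range for 32-bit signed integer.")
--
--     # Convert the number to a 32-bit two's complement hexadecimal
--     if number < 0:
--         number = (1 << 32) + number
--
--     hex_number = f"{number:08X}"
--
--     hex_groups = [int(hex_number[i:i+2], 16) for i in range(0, 8, 2)]
--
--     return hex_groups
-- ===== SOURCE B (Python) =====
-- def decimal_to_hex_groups(number):
--     if not (-2**31 <= number < 2**31):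
--         raise ValueError("Number out of range for 32-bit signed integer.")
--     # two's-complement normalization and byte extraction, no string intermediate:
--     number %= 1 << 32
--     groups = []
--     for _ in range(4):
--         number, byte = divmod(number, 256)
--         groups.append(byte)
--     groups.reverse()
--     return groups
-- ===== Notes on version B (the rewrite author's own statement) =====
-- stated objective: idiomatic
-- what changed: B drops the 8-hex-digit string formatting and 2-char substring parsing entirely, normalizing with number %= 1<<32 and extracting the four bytes arithmetically with divmod(number, 256) in a loop, reversing at the end.
import Mathlib
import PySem

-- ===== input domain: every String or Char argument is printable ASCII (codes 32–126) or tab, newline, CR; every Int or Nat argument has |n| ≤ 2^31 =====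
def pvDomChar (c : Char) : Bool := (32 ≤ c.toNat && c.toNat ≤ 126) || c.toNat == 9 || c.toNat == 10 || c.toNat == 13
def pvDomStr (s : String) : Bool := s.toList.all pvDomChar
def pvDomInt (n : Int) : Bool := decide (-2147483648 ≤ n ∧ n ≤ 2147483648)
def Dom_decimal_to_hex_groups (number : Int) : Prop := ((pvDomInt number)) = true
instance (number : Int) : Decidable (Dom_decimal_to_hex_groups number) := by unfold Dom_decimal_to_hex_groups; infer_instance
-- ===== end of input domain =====

-- B replaces A's 8-hex-digit string formatting + substring parsing by a divmod loop on the
-- integer itself (normalizing with `number %= 1 << 32` instead of the conditional add): idiomatic, no string intermediate.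


-- ===== PORT A =====
-- uppercase hex digit of d (exact for 0 ≤ d < 16, the only values produced below)
def pvHexChar (d : Int) : Char :=
  if d = 0 then '0' else if d = 1 then '1' else if d = 2 then '2' else if d = 3 then '3'
  else if d = 4 then '4' else if d = 5 then '5' else if d = 6 then '6' else if d = 7 then '7'
  else if d = 8 then '8' else if d = 9 then '9' else if d = 10 then 'A' else if d = 11 then 'B'
  else if d = 12 then 'C' else if d = 13 then 'D' else if d = 14 then 'E' else 'F'

-- f"{m:08X}" as a char list: exact for 0 ≤ m < 16^8 (always the case here: 8 digits, zero-padded)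
def pvFormat08X (m : Int) : List Char :=
  [pvHexChar (PySem.Int.mod (PySem.Int.floordiv m 268435456) 16),
   pvHexChar (PySem.Int.mod (PySem.Int.floordiv m 16777216) 16),
   pvHexChar (PySem.Int.mod (PySem.Int.floordiv m 1048576) 16),
   pvHexChar (PySem.Int.mod (PySem.Int.floordiv m 65536) 16),
   pvHexChar (PySem.Int.mod (PySem.Int.floordiv m 4096) 16),
   pvHexChar (PySem.Int.mod (PySem.Int.floordiv m 256) 16),
   pvHexChar (PySem.Int.mod (PySem.Int.floordiv m 16) 16),
   pvHexChar (PySem.Int.mod m 16)]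

-- value of a hex-digit char (exact on '0'-'9','A'-'F', the only chars produced above)
def pvHexVal (c : Char) : Int :=
  if c = '0' then 0 else if c = '1' then 1 else if c = '2' then 2 else if c = '3' then 3
  else if c = '4' then 4 else if c = '5' then 5 else if c = '6' then 6 else if c = '7' then 7
  else if c = '8' then 8 else if c = '9' then 9 else if c = 'A' then 10 else if c = 'B' then 11
  else if c = 'C' then 12 else if c = 'D' then 13 else if c = 'E' then 14 else 15

-- int(s, 16): exact on nonempty strings of hex digits (the only inputs it receives here)
def pvInt16 (cs : List Char) : Int := cs.foldl (fun acc c => 16 * acc + pvHexVal c) 0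

def decimal_to_hex_groups (number : Int) : List Int :=
  -- the range check `raise ValueError` is Pre_decimal_to_hex_groups
  let number := if number < 0 then (1 <<< 32 : Int) + number else number
  let hex_number := pvFormat08X number
  (PySem.List.pyRange 0 8 2).map
    (fun i => pvInt16 (PySem.List.slice hex_number (some i) (some (i + 2))))

-- ===== PORT B =====
def decimal_to_hex_groups_alt (number : Int) : List Int :=
  let st := (PySem.List.pyRange 0 4 1).foldl
      (fun (st : Int × List Int) _ =>
        (PySem.Int.floordiv st.1 256, st.2 ++ [PySem.Int.mod st.1 256]))
      (PySem.Int.mod number (1 <<< 32 : Int), [])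
  st.2.reverse

-- ===== PRECONDITION & SPEC =====
-- exactly A's explicit range check; outside it A raises ValueError
def Pre_decimal_to_hex_groups (number : Int) : Prop := -2147483648 ≤ number ∧ number < 2147483648
instance (number : Int) : Decidable (Pre_decimal_to_hex_groups number) := by unfold Pre_decimal_to_hex_groups; infer_instance
def pvWitness_decimal_to_hex_groups : Int := (-2)

def Spec_decimal_to_hex_groups (number : Int) (out : List Int) : Prop := out = decimal_to_hex_groups_alt number
instance (number : Int) (out : List Int) : Decidable (Spec_decimal_to_hex_groups number out) := by unfold Spec_decimal_to_hex_groups; infer_instance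

-- ===== CLAIM (what is proved, stated in full; the proofs are below) =====
def Claim_equal_decimal_to_hex_groups : Prop := ∀ (number : Int), Dom_decimal_to_hex_groups number → Pre_decimal_to_hex_groups number → Spec_decimal_to_hex_groups number (decimal_to_hex_groups number)

-- ===== LEMMAS AND PROOFS =====
theorem pvHexVal_pvHexChar (d : Int) (h0 : 0 ≤ d) (h16 : d < 16) :
    pvHexVal (pvHexChar d) = d := by
  interval_cases d <;> decide

theorem normalize_eq_mod (number : Int) (h : Pre_decimal_to_hex_groups number) :
    (if number < 0 then (1 <<< 32 : Int) + number else number) = PySem.Int.mod number (1 <<< 32 : Int) := by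
  obtain ⟨h1, h2⟩ := h
  rw [PySem.Int.mod_eq_emod_of_pos (by decide), show ((1 <<< 32 : Int)) = 4294967296 by decide]
  split_ifs with hneg <;> omega

-- ===== VERDICT (by name: the statement is the Claim_ definition above) =====
theorem decimal_to_hex_groups_spec : Claim_equal_decimal_to_hex_groups := by
  intro number hdom hpre
  unfold Spec_decimal_to_hex_groups decimal_to_hex_groups decimal_to_hex_groups_alt
  rw [normalize_eq_mod number hpre]
  have hm0 : 0 ≤ PySem.Int.mod number (1 <<< 32 : Int) :=
    PySem.Int.mod_nonneg _ (by decide)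
  have hm1 : PySem.Int.mod number (1 <<< 32 : Int) < (1 <<< 32 : Int) :=
    PySem.Int.mod_lt _ (by decide)
  rw [show ((1 <<< 32 : Int)) = 4294967296 by decide] at hm1
  generalize PySem.Int.mod number (1 <<< 32 : Int) = m at hm0 hm1
  rw [show PySem.List.pyRange 0 8 2 = [0, 2, 4, 6] by decide,
      show PySem.List.pyRange 0 4 1 = [0, 1, 2, 3] by decide]
  simp only [List.map, List.foldl, pvFormat08X, PySem.List.slice, pvInt16]
  norm_num
  simp [List.foldl]
  repeat rw [pvHexVal_pvHexChar _ (by omega) (by omega)]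
  omega
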